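-- pv_equiv track=rewrite | github.com/Tani843/PAC_Bayes_Certified_Uncertainty_for_Bayesian_Inverse_Heat_Equation | phase7_results_graphs.py | _pick_doc_asset
-- ===== SOURCE A (Python) =====
-- from typing import Dict, List, Tuple, Optional, Any
--
-- def _pick_doc_asset(figure_paths: List[str]) -> Optional[str]:
--     """Helper to pick best document asset path with fallback"""
--     if not figure_paths:
--         return None
--
--     # Prefer PNG for embedding
--     png_candidates = [p for p in figure_paths if 'docs/assets' in p and p.endswith('.png')]
--     if png_candidates:
--         return png_candidates[0]
--
--     # Fall back to SVG
--     svg_candidates = [p for p in figure_paths if 'docs/assets' in p and p.endswith('.svg')]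
--     if svg_candidates:
--         return svg_candidates[0]
--
--     # Last resort: any docs asset
--     doc_candidates = [p for p in figure_paths if 'docs/assets' in p]
--     return doc_candidates[0] if doc_candidates else None
-- ===== SOURCE B (Python) =====
-- from typing import List, Optional
--
-- def _pick_doc_asset(figure_paths: List[str]) -> Optional[str]:
--     """Single pass: return first PNG immediately; otherwise remember first SVG and first docs asset."""
--     first_svg = None
--     first_doc = None
--     for p in figure_paths:
--         if 'docs/assets' not in p:
--             continue
--         if p.endswith('.png'):
--             return p
--         if first_svg is None and p.endswith('.svg'):
--             first_svg = p
--         if first_doc is None: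
--             first_doc = p
--     return first_svg if first_svg is not None else first_doc
-- ===== Notes on version B (the rewrite author's own statement) =====
-- stated objective: simpler
-- what changed: Replaced A's three full-list comprehensions (png, svg, any docs asset) with a single pass that returns the first PNG immediately and otherwise remembers the first SVG and first docs-asset candidates.
import Mathlib
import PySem

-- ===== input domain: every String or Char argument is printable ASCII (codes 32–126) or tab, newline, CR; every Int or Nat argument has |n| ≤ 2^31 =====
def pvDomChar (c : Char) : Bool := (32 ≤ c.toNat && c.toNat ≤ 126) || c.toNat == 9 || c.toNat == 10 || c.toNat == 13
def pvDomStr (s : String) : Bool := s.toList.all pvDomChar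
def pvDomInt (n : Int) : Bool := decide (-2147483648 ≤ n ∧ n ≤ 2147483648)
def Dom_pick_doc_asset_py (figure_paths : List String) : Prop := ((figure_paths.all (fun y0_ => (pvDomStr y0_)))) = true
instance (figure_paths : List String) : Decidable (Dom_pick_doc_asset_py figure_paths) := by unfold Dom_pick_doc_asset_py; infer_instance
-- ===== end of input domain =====

-- B replaces A's three list comprehensions with one traversal keeping the first SVG /
-- first docs-asset candidates and returning on the first PNG (objective: simpler one-pass).

-- ===== PORT A =====
def pick_doc_asset_py (figure_paths : List String) : Option String :=
  if figure_paths = [] then none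
  else
    let png_candidates := figure_paths.filter
      (fun p => PySem.Str.isIn "docs/assets" p && PySem.Str.endswith p ".png")
    match png_candidates with
    | p :: _ => some p
    | [] =>
      let svg_candidates := figure_paths.filter
        (fun p => PySem.Str.isIn "docs/assets" p && PySem.Str.endswith p ".svg")
      match svg_candidates with
      | p :: _ => some p
      | [] =>
        let doc_candidates := figure_paths.filter
          (fun p => PySem.Str.isIn "docs/assets" p)
        match doc_candidates with
        | p :: _ => some p
        | [] => none

-- ===== PORT B =====
def pickLoopB : List String → Option String → Option String → Option String
  | [], first_svg, first_doc => if first_svg.isSome then first_svg else first_doc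
  | p :: rest, first_svg, first_doc =>
    if PySem.Str.isIn "docs/assets" p then
      if PySem.Str.endswith p ".png" then some p
      else
        let first_svg' := if first_svg.isNone && PySem.Str.endswith p ".svg" then some p else first_svg
        let first_doc' := if first_doc.isNone then some p else first_doc
        pickLoopB rest first_svg' first_doc'
    else pickLoopB rest first_svg first_doc

def pick_doc_asset_py_alt (figure_paths : List String) : Option String :=
  pickLoopB figure_paths none none

-- ===== PRECONDITION & SPEC =====
def Spec_pick_doc_asset_py (figure_paths : List String) (out : Option String) : Prop := out = pick_doc_asset_py_alt figure_paths
instance (figure_paths : List String) (out : Option String) : Decidable (Spec_pick_doc_asset_py figure_paths out) := by unfold Spec_pick_doc_asset_py; infer_instance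

-- ===== CLAIM (what is proved, stated in full; the proofs are below) =====
def Claim_equal_pick_doc_asset_py : Prop := ∀ (figure_paths : List String), Dom_pick_doc_asset_py figure_paths → Spec_pick_doc_asset_py figure_paths (pick_doc_asset_py figure_paths)

-- ===== LEMMAS AND PROOFS =====

-- Characterisation of B's loop in terms of A's three filters.
theorem pickLoopB_eq (xs : List String) : ∀ (svg doc : Option String),
    pickLoopB xs svg doc =
      ((xs.filter (fun p => PySem.Str.isIn "docs/assets" p && PySem.Str.endswith p ".png")).head?).or
        (((svg.or (xs.filter (fun p => PySem.Str.isIn "docs/assets" p && PySem.Str.endswith p ".svg")).head?)).or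
          (doc.or (xs.filter (fun p => PySem.Str.isIn "docs/assets" p)).head?)) := by
  induction xs with
  | nil =>
    intro svg doc
    cases svg <;> cases doc <;> simp [pickLoopB]
  | cons p rest ih =>
    intro svg doc
    by_cases hd : PySem.Str.isIn "docs/assets" p = true
    · by_cases hp : PySem.Str.endswith p ".png" = true
      · rw [List.filter_cons_of_pos (l := rest) (by rw [Bool.and_eq_true]; exact ⟨hd, hp⟩), pickLoopB,
            if_pos hd, if_pos hp]
        simp
      · by_cases hs : PySem.Str.endswith p ".svg" = true
        all_goals
          rw [pickLoopB, if_pos hd, if_neg hp,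
              List.filter_cons_of_neg (l := rest) (by rw [Bool.and_eq_true]; exact fun h => hp h.2),
              List.filter_cons_of_pos (l := rest) (p := fun q => PySem.Str.isIn "docs/assets" q) hd]
        · have hs' : PySem.Chars.endswith p.toList ['.', 's', 'v', 'g'] = true := by simpa using hs
          rw [List.filter_cons_of_pos (l := rest) (by rw [Bool.and_eq_true]; exact ⟨hd, hs⟩), ih]
          cases svg <;> cases doc <;> simp [hs', Option.or]
        · have hs' : PySem.Chars.endswith p.toList ['.', 's', 'v', 'g'] = false := by simpa using hs
          rw [List.filter_cons_of_neg (l := rest) (by rw [Bool.and_eq_true]; exact fun h => hs h.2), ih]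
          cases svg <;> cases doc <;> simp [hs', Option.or]
    · rw [pickLoopB, if_neg hd,
          List.filter_cons_of_neg (l := rest) (by rw [Bool.and_eq_true]; exact fun h => hd h.1),
          List.filter_cons_of_neg (l := rest) (by rw [Bool.and_eq_true]; exact fun h => hd h.1),
          List.filter_cons_of_neg (l := rest) (p := fun q => PySem.Str.isIn "docs/assets" q) hd]
      exact ih svg doc

-- A's result in the same shape.
theorem portA_eq (xs : List String) :
    pick_doc_asset_py xs =
      ((xs.filter (fun p => PySem.Str.isIn "docs/assets" p && PySem.Str.endswith p ".png")).head?).or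
        (((xs.filter (fun p => PySem.Str.isIn "docs/assets" p && PySem.Str.endswith p ".svg")).head?).or
          ((xs.filter (fun p => PySem.Str.isIn "docs/assets" p)).head?)) := by
  unfold pick_doc_asset_py
  by_cases h : xs = []
  · subst h; simp
  · simp only [h, if_false]
    cases h1 : xs.filter (fun p => PySem.Str.isIn "docs/assets" p && PySem.Str.endswith p ".png") with
    | cons a t => simp
    | nil =>
      cases h2 : xs.filter (fun p => PySem.Str.isIn "docs/assets" p && PySem.Str.endswith p ".svg") with
      | cons a t => simp
      | nil =>
        cases h3 : xs.filter (fun p => PySem.Str.isIn "docs/assets" p) with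
        | cons a t => simp
        | nil => simp

-- ===== VERDICT (by name: the statement is the Claim_ definition above) =====
theorem pick_doc_asset_py_spec : Claim_equal_pick_doc_asset_py := by
  intro xs _
  show pick_doc_asset_py xs = pick_doc_asset_py_alt xs
  rw [portA_eq, pick_doc_asset_py_alt, pickLoopB_eq]
  simp
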